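-- pv_equiv track=rewrite | github.com/alex4321/bitlinear | bitlinear/bitlinear/basic.py | _generate_parameter_mappings
-- ===== SOURCE A (Python) =====
-- from typing import List, Union, Tuple, Iterable
--
-- def _generate_parameter_mappings(parameter_count: int, pad_to_size: int) -> List[List[int]]:
--     def _iter(rest_count):
--         if rest_count == 0:
--             return [[]]
--         else:
--             result = []
--             for p in [-1, 0, 1]:
--                 for rest in _iter(rest_count-1):
--                     result.append([p] + rest)
--             return result
--
--     response = _iter(parameter_count)
--     assert len(response) < pad_to_size
--     response += [ [1] * parameter_count ] * (pad_to_size - len(response))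
--     return response
-- ===== SOURCE B (Python) =====
-- def _generate_parameter_mappings(parameter_count: int, pad_to_size: int):
--     count = 3 ** parameter_count
--     assert count < pad_to_size
--     response = []
--     for i in range(count):
--         digits = []
--         x = i
--         for _ in range(parameter_count):
--             x, d = divmod(x, 3)
--             digits.append(d - 1)
--         response.append(digits[::-1])
--     response += [[1] * parameter_count] * (pad_to_size - len(response))
--     return response
-- ===== Notes on version B (the rewrite author's own statement) =====
-- stated objective: alternative
-- what changed: B replaces A's recursive prefix-copying enumeration by a single loop that decodes each index 0..3**n-1 into base-3 digits (mapped to -1/0/1, MSB first), keeping the same padding step; same lexicographic output.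
import Mathlib
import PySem

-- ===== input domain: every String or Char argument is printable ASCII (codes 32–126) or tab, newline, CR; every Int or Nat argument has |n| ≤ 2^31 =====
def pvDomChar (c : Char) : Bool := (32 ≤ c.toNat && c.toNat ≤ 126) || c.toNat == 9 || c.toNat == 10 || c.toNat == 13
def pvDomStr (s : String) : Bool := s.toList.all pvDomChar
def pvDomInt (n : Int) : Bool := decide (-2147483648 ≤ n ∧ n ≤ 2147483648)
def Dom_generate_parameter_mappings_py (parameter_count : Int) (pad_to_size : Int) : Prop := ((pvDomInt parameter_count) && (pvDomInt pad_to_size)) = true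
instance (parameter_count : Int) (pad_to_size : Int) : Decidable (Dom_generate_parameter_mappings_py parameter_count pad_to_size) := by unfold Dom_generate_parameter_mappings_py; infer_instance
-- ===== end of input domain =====

-- B enumerates the {-1,0,1}^n rows by base-3 index decoding instead of A's recursive
-- prefix-copying; an alternative algorithm of the same cost (objective: alternative).

-- ===== PORT A =====
-- A's nested helper `_iter(rest_count)`; recursion counter taken as a Nat
-- (Pre_ guarantees 0 ≤ parameter_count; on negative counts Python A never returns).
def pvIterA : Nat → List (List Int)
  | 0 => [[]]
  | n + 1 =>
    [(-1 : Int), 0, 1].foldl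
      (fun result p => (pvIterA n).foldl (fun result rest => result ++ [p :: rest]) result) []

def generate_parameter_mappings_py (parameter_count : Int) (pad_to_size : Int) : List (List Int) :=
  let response := pvIterA parameter_count.toNat
  response ++ List.replicate (pad_to_size - (response.length : Int)).toNat
      (List.replicate parameter_count.toNat 1)

-- ===== PORT B =====
-- B's inner digit loop: `x, d = divmod(x, 3); digits.append(d - 1)` repeated `count` times.
def pvDigitsB : Nat → Nat → List Int
  | _, 0 => []
  | x, k + 1 => (((x % 3 : Nat) : Int) - 1) :: pvDigitsB (x / 3) k

def generate_parameter_mappings_py_alt (parameter_count : Int) (pad_to_size : Int) : List (List Int) :=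
  let n := parameter_count.toNat
  let response := (List.range (3 ^ n)).map (fun i => (pvDigitsB i n).reverse)
  response ++ List.replicate (pad_to_size - (response.length : Int)).toNat (List.replicate n 1)

-- ===== PRECONDITION & SPEC =====
-- Pre_ = exactly where Python A returns: on negative parameter_count A's recursion never
-- terminates, and when pad_to_size ≤ 3^parameter_count the assert raises AssertionError.
def Pre_generate_parameter_mappings_py (parameter_count : Int) (pad_to_size : Int) : Prop :=
  0 ≤ parameter_count ∧ ((3 : Int) ^ parameter_count.toNat) < pad_to_size
instance (parameter_count : Int) (pad_to_size : Int) : Decidable (Pre_generate_parameter_mappings_py parameter_count pad_to_size) := by unfold Pre_generate_parameter_mappings_py; infer_instance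
def pvWitness_generate_parameter_mappings_py : Int × Int := (2, 12)

def Spec_generate_parameter_mappings_py (parameter_count : Int) (pad_to_size : Int) (out : List (List Int)) : Prop := out = generate_parameter_mappings_py_alt parameter_count pad_to_size
instance (parameter_count : Int) (pad_to_size : Int) (out : List (List Int)) : Decidable (Spec_generate_parameter_mappings_py parameter_count pad_to_size out) := by unfold Spec_generate_parameter_mappings_py; infer_instance

-- ===== CLAIM (what is proved, stated in full; the proofs are below) =====
def Claim_equal_generate_parameter_mappings_py : Prop := ∀ (parameter_count : Int) (pad_to_size : Int), Dom_generate_parameter_mappings_py parameter_count pad_to_size → Pre_generate_parameter_mappings_py parameter_count pad_to_size → Spec_generate_parameter_mappings_py parameter_count pad_to_size (generate_parameter_mappings_py parameter_count pad_to_size)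

-- ===== LEMMAS AND PROOFS =====

-- inner append loop of A = map
theorem pv_foldl_append_map {α β : Type} (xs : List α) (g : α → β) (init : List β) :
    xs.foldl (fun acc r => acc ++ [g r]) init = init ++ xs.map g := by
  induction xs generalizing init with
  | nil => simp
  | cons a xs ih => simp [List.foldl, ih]

-- base-3 digit decomposition of d*3^n + j
theorem pvDigitsB_split (n : Nat) : ∀ d j : Nat, d < 3 → j < 3 ^ n →
    pvDigitsB (d * 3 ^ n + j) (n + 1) = pvDigitsB j n ++ [(d : Int) - 1] := by
  induction n with
  | zero =>
    intro d j hd hj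
    interval_cases j
    simp [pvDigitsB, Nat.mod_eq_of_lt hd]
  | succ n ih =>
    intro d j hd hj
    have hx : d * 3 ^ (n + 1) + j = 3 * (d * 3 ^ n) + j := by ring
    have hmod : (d * 3 ^ (n + 1) + j) % 3 = j % 3 := by omega
    have hdiv : (d * 3 ^ (n + 1) + j) / 3 = d * 3 ^ n + j / 3 := by omega
    have hj' : j < 3 * 3 ^ n := by rw [pow_succ] at hj; omega
    have hj3 : j / 3 < 3 ^ n := by omega
    conv_lhs => rw [pvDigitsB]
    rw [hmod, hdiv, ih d (j / 3) hd hj3]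
    conv_rhs => rw [pvDigitsB]
    simp

-- A's enumeration = B's enumeration
theorem pvIterA_eq (n : Nat) :
    pvIterA n = (List.range (3 ^ n)).map (fun i => (pvDigitsB i n).reverse) := by
  induction n with
  | zero => simp [pvIterA, pvDigitsB]
  | succ n ih =>
    have step1 : pvIterA (n + 1)
        = ((pvIterA n).map (fun r => (-1 : Int) :: r))
            ++ ((pvIterA n).map (fun r => (0 : Int) :: r))
            ++ ((pvIterA n).map (fun r => (1 : Int) :: r)) := by
      rw [pvIterA]
      simp only [List.foldl_cons, List.foldl_nil, pv_foldl_append_map, List.nil_append]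
    have ha : (3 : Nat) ^ (n + 1) = 3 ^ n + (3 ^ n + 3 ^ n) := by rw [pow_succ]; ring
    rw [step1, ih, ha, List.range_add, List.range_add]
    simp only [List.map_append, List.map_map, List.append_assoc]
    congr 1
    · apply List.map_congr_left
      intro j hj
      rw [List.mem_range] at hj
      have h0 : j = 0 * 3 ^ n + j := by ring
      rw [h0, pvDigitsB_split n 0 j (by norm_num) hj]
      simp
    congr 1
    · apply List.map_congr_left
      intro j hj
      rw [List.mem_range] at hj
      simp only [Function.comp_apply]
      have h1 : 3 ^ n + j = 1 * 3 ^ n + j := by ring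
      rw [h1, pvDigitsB_split n 1 j (by norm_num) hj]
      simp
    · apply List.map_congr_left
      intro j hj
      rw [List.mem_range] at hj
      simp only [Function.comp_apply]
      have h2 : 3 ^ n + (3 ^ n + j) = 2 * 3 ^ n + j := by ring
      rw [h2, pvDigitsB_split n 2 j (by norm_num) hj]
      simp

-- ===== VERDICT (by name: the statement is the Claim_ definition above) =====
theorem generate_parameter_mappings_py_spec : Claim_equal_generate_parameter_mappings_py := by
  intro pc ps _ _
  show generate_parameter_mappings_py pc ps = generate_parameter_mappings_py_alt pc ps
  simp only [generate_parameter_mappings_py, generate_parameter_mappings_py_alt, pvIterA_eq]
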